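-- pv_equiv track=rewrite | github.com/wtarnawski/nonogram | main.py | load_line
-- ===== SOURCE A (Python) =====
-- def load_line(line):
--     if not "__iter__" in dir(line):
--         raise Exception("line is not iterable")
--     output = []
--     counter = 0
--     for x in line:
--         if x:
--             counter += 1
--         else:
--             if counter:  # append if not zero
--                 output.append(counter)
--                 counter = 0
--     if counter:
--         output.append(counter)
--     return tuple(output)
-- ===== SOURCE B (Python) =====
-- def load_line(line):
--     if not "__iter__" in dir(line):
--         raise Exception("line is not iterable")
--     items = list(line)
--     n = len(items)
--     out = []
--     i = 0
--     while i < n: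
--         if items[i]:
--             j = i
--             while j < n and items[j]:
--                 j += 1
--             out.append(j - i)
--             i = j
--         else:
--             i += 1
--     return tuple(out)
-- ===== Notes on version B (the rewrite author's own statement) =====
-- stated objective: alternative
-- what changed: Replaces A's single pass maintaining and resetting a running counter with a two-pointer run scan: an outer loop finds the start of each truthy run, an inner scan finds its end, and the run length j-i is appended directly.
import Mathlib
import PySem

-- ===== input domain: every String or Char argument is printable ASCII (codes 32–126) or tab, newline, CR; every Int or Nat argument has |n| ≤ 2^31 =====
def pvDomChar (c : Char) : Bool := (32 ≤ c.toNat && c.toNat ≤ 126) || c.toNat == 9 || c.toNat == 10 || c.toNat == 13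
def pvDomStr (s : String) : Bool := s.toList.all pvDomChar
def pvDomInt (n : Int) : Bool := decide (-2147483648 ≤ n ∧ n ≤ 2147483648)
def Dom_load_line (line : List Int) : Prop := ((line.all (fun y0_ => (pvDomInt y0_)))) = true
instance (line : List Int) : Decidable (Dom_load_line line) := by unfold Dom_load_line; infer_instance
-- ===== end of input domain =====

-- B replaces A's running-counter pass with a two-pointer run scan (find run start, scan to run end, emit length); alternative decomposition, same cost.


-- ===== PORT A =====
-- A: one pass keeping (output, counter); counter incremented on truthy x, flushed on falsy x, final flush after the loop.
def load_line_step (st : List Int × Int) (x : Int) : List Int × Int :=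
  if x ≠ 0 then (st.1, st.2 + 1)
  else if st.2 ≠ 0 then (st.1 ++ [st.2], 0) else st

def load_line (line : List Int) : List Int :=
  let s := line.foldl load_line_step ([], 0)
  if s.2 ≠ 0 then s.1 ++ [s.2] else s.1

-- ===== PORT B =====
-- B: two-pointer run scan; the inner 'while truthy' scan is takeWhile/dropWhile on the remaining list.
def load_line_alt_go : List Int → List Int
  | [] => []
  | x :: xs =>
    if x ≠ 0 then
      ((1 + (xs.takeWhile (fun y => y ≠ 0)).length : Nat) : Int)
        :: load_line_alt_go (xs.dropWhile (fun y => y ≠ 0))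
    else
      load_line_alt_go xs
  termination_by l => l.length
  decreasing_by
  · have h := List.length_dropWhile_le (fun y : Int => decide (y ≠ 0)) xs
    simp at h ⊢; omega
  · simp

def load_line_alt (line : List Int) : List Int := load_line_alt_go line

-- ===== PRECONDITION & SPEC =====
def Spec_load_line (line : List Int) (out : List Int) : Prop := out = load_line_alt line
instance (line : List Int) (out : List Int) : Decidable (Spec_load_line line out) := by unfold Spec_load_line; infer_instance

-- ===== CLAIM (what is proved, stated in full; the proofs are below) =====
def Claim_equal_load_line : Prop := ∀ (line : List Int), Dom_load_line line → Spec_load_line line (load_line line)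

-- ===== LEMMAS AND PROOFS =====

-- A's post-loop flush, named so the fold invariant can be stated.
def pvFin (s : List Int × Int) : List Int := if s.2 ≠ 0 then s.1 ++ [s.2] else s.1

-- go on a nonempty block of ones followed by l: one run of length n + (leading truthy run of l).
theorem go_replicate (n : Nat) (l : List Int) (hn : 0 < n) :
    load_line_alt_go (List.replicate n 1 ++ l)
      = ((n + (l.takeWhile (fun y => y ≠ 0)).length : Nat) : Int)
          :: load_line_alt_go (l.dropWhile (fun y => y ≠ 0)) := by
  induction n with
  | zero => omega
  | succ m ih =>
    cases Nat.eq_zero_or_pos m with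
    | inl h0 =>
      subst h0
      simp [load_line_alt_go]
    | inr hm =>
      rw [List.replicate_succ, List.cons_append, load_line_alt_go]
      have ht : (List.replicate m (1:Int) ++ l).takeWhile (fun y => y ≠ 0)
          = List.replicate m 1 ++ l.takeWhile (fun y => y ≠ 0) := by
        induction m with
        | zero => simp
        | succ k _ => simp [List.replicate_succ]
      have hd : (List.replicate m (1:Int) ++ l).dropWhile (fun y => y ≠ 0)
          = l.dropWhile (fun y => y ≠ 0) := by
        induction m with
        | zero => simp
        | succ k _ => simp [List.replicate_succ]
      rw [ht, hd, ih hm]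
      simp
      ring

theorem finish_eq (l : List Int) (acc : List Int) (c : Int) (hc : 0 ≤ c) :
    pvFin (l.foldl load_line_step (acc, c))
      = acc ++ load_line_alt_go (List.replicate c.toNat 1 ++ l) := by
  induction l generalizing acc c with
  | nil =>
    by_cases h : c = 0
    · subst h; simp [pvFin, load_line_alt_go]
    · have hpos : 0 < c.toNat := by omega
      rw [show (List.replicate c.toNat (1:Int) ++ [] : List Int)
            = List.replicate c.toNat 1 ++ [] by simp, go_replicate _ _ hpos]
      simp [pvFin, load_line_alt_go, h]
      omega
  | cons x xs ih =>
    by_cases hx : x = 0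
    · subst hx
      by_cases h : c = 0
      · subst h
        rw [List.foldl_cons, show load_line_step (acc, 0) 0 = (acc, 0) by
              simp [load_line_step],
            ih _ 0 le_rfl]
        simp [load_line_alt_go]
      · have hpos : 0 < c.toNat := by omega
        rw [List.foldl_cons, show load_line_step (acc, c) 0 = (acc ++ [c], 0) by
              simp [load_line_step, h],
            ih _ 0 le_rfl, go_replicate _ _ hpos]
        simp [load_line_alt_go]
        omega
    · rw [List.foldl_cons, show load_line_step (acc, c) x = (acc, c + 1) by
            simp [load_line_step, hx],
          ih _ (c+1) (by omega)]
      congr 1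
      by_cases h : c = 0
      · subst h
        simp [load_line_alt_go, hx, List.replicate_succ]
      · have hpos : 0 < c.toNat := by omega
        have hpos' : 0 < (c+1).toNat := by omega
        rw [go_replicate _ _ hpos, go_replicate _ _ hpos']
        simp [hx]
        omega

-- ===== VERDICT (by name: the statement is the Claim_ definition above) =====
theorem load_line_spec : Claim_equal_load_line := by
  intro line _
  unfold Spec_load_line load_line load_line_alt
  simpa [pvFin] using finish_eq line [] 0 le_rfl
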